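-- pv_equiv track=rewrite | github.com/sekharcidambi/adocs | comprehensive_adocs_service.py | _determine_business_domain
-- ===== SOURCE A (Python) =====
-- def _determine_business_domain(repo_name: str, description: str) -> str:
--     """Determine business domain based on repository name and description."""
--     repo_name_lower = repo_name.lower()
--     description_lower = description.lower()
--
--     if any(keyword in repo_name_lower for keyword in ['web', 'frontend', 'ui', 'client']):
--         return 'Web Development'
--     elif any(keyword in repo_name_lower for keyword in ['api', 'backend', 'server', 'service']):
--         return 'Backend Development'
--     elif any(keyword in repo_name_lower for keyword in ['mobile', 'ios', 'android', 'app']):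
--         return 'Mobile Development'
--     elif any(keyword in repo_name_lower for keyword in ['data', 'ml', 'ai', 'analytics']):
--         return 'Data Science'
--     elif any(keyword in repo_name_lower for keyword in ['devops', 'infra', 'deploy', 'ci']):
--         return 'DevOps'
--     elif any(keyword in description_lower for keyword in ['e-commerce', 'shopping', 'store']):
--         return 'E-Commerce'
--     elif any(keyword in description_lower for keyword in ['crm', 'customer', 'management']):
--         return 'Customer Relationship Management'
--     elif any(keyword in description_lower for keyword in ['erp', 'enterprise', 'business']):
--         return 'Enterprise Resource Planning'
--     else:
--         return 'Software Development'
-- ===== SOURCE B (Python) =====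
-- # B: exhaustive min-rank search over a flat per-keyword table instead of a
-- # short-circuiting branch cascade: every keyword match is considered and the
-- # label of the lowest-rank (highest-priority) match wins.
-- _KEYWORD_TABLE = (
--     ('web', 0, False, 'Web Development'),
--     ('frontend', 0, False, 'Web Development'),
--     ('ui', 0, False, 'Web Development'),
--     ('client', 0, False, 'Web Development'),
--     ('api', 1, False, 'Backend Development'),
--     ('backend', 1, False, 'Backend Development'),
--     ('server', 1, False, 'Backend Development'),
--     ('service', 1, False, 'Backend Development'),
--     ('mobile', 2, False, 'Mobile Development'),
--     ('ios', 2, False, 'Mobile Development'),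
--     ('android', 2, False, 'Mobile Development'),
--     ('app', 2, False, 'Mobile Development'),
--     ('data', 3, False, 'Data Science'),
--     ('ml', 3, False, 'Data Science'),
--     ('ai', 3, False, 'Data Science'),
--     ('analytics', 3, False, 'Data Science'),
--     ('devops', 4, False, 'DevOps'),
--     ('infra', 4, False, 'DevOps'),
--     ('deploy', 4, False, 'DevOps'),
--     ('ci', 4, False, 'DevOps'),
--     ('e-commerce', 5, True, 'E-Commerce'),
--     ('shopping', 5, True, 'E-Commerce'),
--     ('store', 5, True, 'E-Commerce'),
--     ('crm', 6, True, 'Customer Relationship Management'),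
--     ('customer', 6, True, 'Customer Relationship Management'),
--     ('management', 6, True, 'Customer Relationship Management'),
--     ('erp', 7, True, 'Enterprise Resource Planning'),
--     ('enterprise', 7, True, 'Enterprise Resource Planning'),
--     ('business', 7, True, 'Enterprise Resource Planning'),
-- )
--
--
-- def _determine_business_domain(repo_name: str, description: str) -> str:
--     name = repo_name.lower()
--     desc = description.lower()
--     best = None
--     for keyword, rank, in_desc, label in _KEYWORD_TABLE:
--         if keyword in (desc if in_desc else name):
--             if best is None or rank < best[0]:
--                 best = (rank, label)
--     return best[1] if best is not None else 'Software Development'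
-- ===== Notes on version B (the rewrite author's own statement) =====
-- stated objective: alternative
-- what changed: Replaces the short-circuiting eight-branch if/elif cascade with an exhaustive single pass over a flat per-keyword table that accumulates the minimum-rank match and returns its label (no early return, min-accumulator instead of branch order).
import Mathlib
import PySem

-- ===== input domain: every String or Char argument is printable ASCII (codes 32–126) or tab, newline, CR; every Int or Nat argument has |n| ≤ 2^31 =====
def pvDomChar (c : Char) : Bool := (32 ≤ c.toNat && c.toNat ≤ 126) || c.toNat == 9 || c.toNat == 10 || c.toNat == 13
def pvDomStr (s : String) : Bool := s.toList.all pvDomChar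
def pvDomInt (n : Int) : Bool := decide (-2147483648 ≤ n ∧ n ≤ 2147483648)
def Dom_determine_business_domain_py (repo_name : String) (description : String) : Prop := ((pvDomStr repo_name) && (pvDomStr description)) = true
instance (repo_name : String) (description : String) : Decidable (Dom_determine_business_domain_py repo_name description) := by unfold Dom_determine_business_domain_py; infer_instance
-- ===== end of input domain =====

-- B replaces A's short-circuiting if/elif cascade by an exhaustive pass over a flat
-- per-keyword table accumulating the minimum-rank match; objective: alternative (same cost).

-- ===== PORT A =====
def determine_business_domain_py (repo_name : String) (description : String) : String :=
  let repo_name_lower := PySem.Str.lower repo_name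
  let description_lower := PySem.Str.lower description
  if ["web", "frontend", "ui", "client"].any (fun keyword => PySem.Str.isIn keyword repo_name_lower) then
    "Web Development"
  else if ["api", "backend", "server", "service"].any (fun keyword => PySem.Str.isIn keyword repo_name_lower) then
    "Backend Development"
  else if ["mobile", "ios", "android", "app"].any (fun keyword => PySem.Str.isIn keyword repo_name_lower) then
    "Mobile Development"
  else if ["data", "ml", "ai", "analytics"].any (fun keyword => PySem.Str.isIn keyword repo_name_lower) then
    "Data Science"
  else if ["devops", "infra", "deploy", "ci"].any (fun keyword => PySem.Str.isIn keyword repo_name_lower) then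
    "DevOps"
  else if ["e-commerce", "shopping", "store"].any (fun keyword => PySem.Str.isIn keyword description_lower) then
    "E-Commerce"
  else if ["crm", "customer", "management"].any (fun keyword => PySem.Str.isIn keyword description_lower) then
    "Customer Relationship Management"
  else if ["erp", "enterprise", "business"].any (fun keyword => PySem.Str.isIn keyword description_lower) then
    "Enterprise Resource Planning"
  else
    "Software Development"

-- ===== PORT B =====
-- flat per-keyword table: (keyword, rank, in_desc, label)
def pvGroup (kws : List String) (rank : Int) (in_desc : Bool) (label : String) : List (String × Int × Bool × String) :=
  kws.map (fun k => (k, rank, in_desc, label))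

def pvKeywordTable : List (String × Int × Bool × String) :=
  pvGroup ["web", "frontend", "ui", "client"] 0 false "Web Development" ++
  pvGroup ["api", "backend", "server", "service"] 1 false "Backend Development" ++
  pvGroup ["mobile", "ios", "android", "app"] 2 false "Mobile Development" ++
  pvGroup ["data", "ml", "ai", "analytics"] 3 false "Data Science" ++
  pvGroup ["devops", "infra", "deploy", "ci"] 4 false "DevOps" ++
  pvGroup ["e-commerce", "shopping", "store"] 5 true "E-Commerce" ++
  pvGroup ["crm", "customer", "management"] 6 true "Customer Relationship Management" ++
  pvGroup ["erp", "enterprise", "business"] 7 true "Enterprise Resource Planning"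

-- the loop body: keep the lowest-rank match seen so far
def pvStep (name desc : String) (best : Option (Int × String)) (e : String × Int × Bool × String) : Option (Int × String) :=
  if PySem.Str.isIn e.1 (if e.2.2.1 then desc else name) then
    match best with
    | none => some (e.2.1, e.2.2.2)
    | some b => if e.2.1 < b.1 then some (e.2.1, e.2.2.2) else some b
  else best

def determine_business_domain_py_alt (repo_name : String) (description : String) : String :=
  let name := PySem.Str.lower repo_name
  let desc := PySem.Str.lower description
  match pvKeywordTable.foldl (pvStep name desc) none with
  | some b => b.2
  | none => "Software Development"

-- ===== PRECONDITION & SPEC =====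
def Spec_determine_business_domain_py (repo_name : String) (description : String) (out : String) : Prop := out = determine_business_domain_py_alt repo_name description
instance (repo_name : String) (description : String) (out : String) : Decidable (Spec_determine_business_domain_py repo_name description out) := by unfold Spec_determine_business_domain_py; infer_instance

-- ===== CLAIM (what is proved, stated in full; the proofs are below) =====
def Claim_equal_determine_business_domain_py : Prop := ∀ (repo_name : String) (description : String), Dom_determine_business_domain_py repo_name description → Spec_determine_business_domain_py repo_name description (determine_business_domain_py repo_name description)

-- ===== LEMMAS AND PROOFS =====

theorem ite_false_true {α : Type} (a b : α) : (if false = true then a else b) = b := rfl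

-- folding one group over an already-at-least-as-good accumulator changes nothing
theorem foldl_keep (name desc : String) (kws : List String) (rank : Int) (ud : Bool) (label : String)
    (b : Int × String) (h : ¬ rank < b.1) :
    (pvGroup kws rank ud label).foldl (pvStep name desc) (some b) = some b := by
  induction kws with
  | nil => rfl
  | cons k rest ih =>
    rw [pvGroup, List.map_cons, List.foldl_cons]
    by_cases hk : PySem.Str.isIn k (if ud = true then desc else name) = true
    · simp only [pvStep, if_pos hk]
      rw [if_neg h]
      exact ih
    · simp only [pvStep, if_neg hk]
      exact ih

-- folding one group over an empty accumulator: some (rank, label) iff some keyword matches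
theorem foldl_group_none (name desc : String) (kws : List String) (rank : Int) (ud : Bool) (label : String) :
    (pvGroup kws rank ud label).foldl (pvStep name desc) none
      = if kws.any (fun k => PySem.Str.isIn k (if ud then desc else name)) then some (rank, label) else none := by
  induction kws with
  | nil => rfl
  | cons k rest ih =>
    rw [pvGroup, List.map_cons, List.foldl_cons, List.any_cons]
    by_cases hk : PySem.Str.isIn k (if ud = true then desc else name) = true
    · simp only [pvStep, if_pos hk]
      rw [hk, Bool.true_or, if_pos rfl]
      exact foldl_keep name desc rest rank ud label (rank, label) (lt_irrefl rank)
    · have hk' : PySem.Str.isIn k (if ud = true then desc else name) = false := by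
        revert hk; cases PySem.Str.isIn k (if ud = true then desc else name) <;> simp
      simp only [pvStep, if_neg hk]
      rw [hk', Bool.false_or]
      exact ih

-- ===== VERDICT (by name: the statement is the Claim_ definition above) =====
theorem determine_business_domain_py_spec : Claim_equal_determine_business_domain_py := by
  intro repo_name description _
  show _ = _
  simp only [determine_business_domain_py, determine_business_domain_py_alt, pvKeywordTable,
    List.foldl_append, foldl_group_none, ite_false_true]
  by_cases h0 : (["web", "frontend", "ui", "client"].any (fun k => PySem.Str.isIn k (PySem.Str.lower repo_name))) = true
  · rw [if_pos h0, if_pos h0, foldl_keep _ _ _ 1 false _ _ (by decide), foldl_keep _ _ _ 2 false _ _ (by decide), foldl_keep _ _ _ 3 false _ _ (by decide), foldl_keep _ _ _ 4 false _ _ (by decide), foldl_keep _ _ _ 5 true _ _ (by decide), foldl_keep _ _ _ 6 true _ _ (by decide), foldl_keep _ _ _ 7 true _ _ (by decide)]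
  rw [if_neg h0, if_neg h0]
  rw [foldl_group_none]
  simp only [ite_false_true]
  by_cases h1 : (["api", "backend", "server", "service"].any (fun k => PySem.Str.isIn k (PySem.Str.lower repo_name))) = true
  · rw [if_pos h1, if_pos h1, foldl_keep _ _ _ 2 false _ _ (by decide), foldl_keep _ _ _ 3 false _ _ (by decide), foldl_keep _ _ _ 4 false _ _ (by decide), foldl_keep _ _ _ 5 true _ _ (by decide), foldl_keep _ _ _ 6 true _ _ (by decide), foldl_keep _ _ _ 7 true _ _ (by decide)]
  rw [if_neg h1, if_neg h1]
  rw [foldl_group_none]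
  simp only [ite_false_true]
  by_cases h2 : (["mobile", "ios", "android", "app"].any (fun k => PySem.Str.isIn k (PySem.Str.lower repo_name))) = true
  · rw [if_pos h2, if_pos h2, foldl_keep _ _ _ 3 false _ _ (by decide), foldl_keep _ _ _ 4 false _ _ (by decide), foldl_keep _ _ _ 5 true _ _ (by decide), foldl_keep _ _ _ 6 true _ _ (by decide), foldl_keep _ _ _ 7 true _ _ (by decide)]
  rw [if_neg h2, if_neg h2]
  rw [foldl_group_none]
  simp only [ite_false_true]
  by_cases h3 : (["data", "ml", "ai", "analytics"].any (fun k => PySem.Str.isIn k (PySem.Str.lower repo_name))) = true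
  · rw [if_pos h3, if_pos h3, foldl_keep _ _ _ 4 false _ _ (by decide), foldl_keep _ _ _ 5 true _ _ (by decide), foldl_keep _ _ _ 6 true _ _ (by decide), foldl_keep _ _ _ 7 true _ _ (by decide)]
  rw [if_neg h3, if_neg h3]
  rw [foldl_group_none]
  simp only [ite_false_true]
  by_cases h4 : (["devops", "infra", "deploy", "ci"].any (fun k => PySem.Str.isIn k (PySem.Str.lower repo_name))) = true
  · rw [if_pos h4, if_pos h4, foldl_keep _ _ _ 5 true _ _ (by decide), foldl_keep _ _ _ 6 true _ _ (by decide), foldl_keep _ _ _ 7 true _ _ (by decide)]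
  rw [if_neg h4, if_neg h4]
  rw [foldl_group_none]
  simp only [if_true]
  by_cases h5 : (["e-commerce", "shopping", "store"].any (fun k => PySem.Str.isIn k (PySem.Str.lower description))) = true
  · rw [if_pos h5, if_pos h5, foldl_keep _ _ _ 6 true _ _ (by decide), foldl_keep _ _ _ 7 true _ _ (by decide)]
  rw [if_neg h5, if_neg h5]
  rw [foldl_group_none]
  simp only [if_true]
  by_cases h6 : (["crm", "customer", "management"].any (fun k => PySem.Str.isIn k (PySem.Str.lower description))) = true
  · rw [if_pos h6, if_pos h6, foldl_keep _ _ _ 7 true _ _ (by decide)]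
  rw [if_neg h6, if_neg h6]
  rw [foldl_group_none]
  simp only [if_true]
  by_cases h7 : (["erp", "enterprise", "business"].any (fun k => PySem.Str.isIn k (PySem.Str.lower description))) = true
  · rw [if_pos h7, if_pos h7]
  · rw [if_neg h7, if_neg h7]
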